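-- pv_equiv track=rewrite | github.com/sanpicule/react-fastapi-app | backend/app/middleware/audit_log.py | _extract_resource_ids
-- ===== SOURCE A (Python) =====
-- def _extract_resource_ids(path_params: dict) -> int | None:
--     """パスパラメータから最後のリソースIDを抽出"""
--     if not path_params:
--         return None
--
--     # ID系のパラメータのみを抽出
--     id_params = []
--     for key, value in path_params.items():
--         # IDっぽいパラメータを収集
--         if key == "id" or key.endswith("_id"):
--             try:
--                 # 整数変換できる場合のみ追加
--                 id_params.append(int(value))
--             except (ValueError, TypeError):
--                 pass
--
--     if not id_params:
--         return None
--
--     # 最後のIDを返す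
--     return id_params[-1]
-- ===== SOURCE B (Python) =====
-- def _extract_resource_ids(path_params: dict) -> int | None:
--     """パスパラメータから最後のリソースIDを抽出"""
--     for key, value in reversed(path_params.items()):
--         if key == "id" or key.endswith("_id"):
--             try:
--                 return int(value)
--             except (ValueError, TypeError):
--                 pass
--     return None
-- ===== Notes on version B (the rewrite author's own statement) =====
-- stated objective: simpler
-- what changed: B scans the items in reverse and returns the first key matching 'id'/'*_id' that parses as an int, instead of building a list of all parsed ids and taking its last element; the empty-dict guard and the intermediate list disappear.
import Mathlib
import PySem

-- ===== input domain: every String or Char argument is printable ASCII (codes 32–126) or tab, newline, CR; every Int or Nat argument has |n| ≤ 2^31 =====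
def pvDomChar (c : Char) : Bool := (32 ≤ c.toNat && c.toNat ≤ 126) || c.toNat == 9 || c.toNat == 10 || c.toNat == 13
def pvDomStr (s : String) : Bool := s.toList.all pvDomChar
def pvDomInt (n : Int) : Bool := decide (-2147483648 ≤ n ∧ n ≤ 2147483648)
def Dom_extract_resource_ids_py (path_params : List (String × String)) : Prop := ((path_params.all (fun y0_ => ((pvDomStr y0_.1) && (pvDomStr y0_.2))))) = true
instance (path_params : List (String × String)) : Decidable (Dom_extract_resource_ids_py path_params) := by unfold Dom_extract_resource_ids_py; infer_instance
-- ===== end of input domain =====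

-- B replaces A's collect-all-then-take-last pass by a reverse scan with early return; objective: simpler.


-- ===== PORT A =====
def extract_resource_ids_py (path_params : List (String × String)) : Option Int :=
  if path_params = [] then none
  else
    let id_params : List Int := path_params.foldl (fun acc kv =>
      if kv.1 == "id" || PySem.Str.endswith kv.1 "_id" then
        match PySem.Int.ofStr? kv.2 with
        | some n => acc ++ [n]
        | none => acc
      else acc) []
    if id_params = [] then none
    else PySem.List.pyGet? id_params (-1)

-- ===== PORT B =====
def extractAltGo : List (String × String) → Option Int
  | [] => none
  | (k, v) :: rest =>
    if k == "id" || PySem.Str.endswith k "_id" then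
      match PySem.Int.ofStr? v with
      | some n => some n
      | none => extractAltGo rest
    else extractAltGo rest

def extract_resource_ids_py_alt (path_params : List (String × String)) : Option Int :=
  extractAltGo path_params.reverse

-- ===== PRECONDITION & SPEC =====
def Spec_extract_resource_ids_py (path_params : List (String × String)) (out : Option Int) : Prop := out = extract_resource_ids_py_alt path_params
instance (path_params : List (String × String)) (out : Option Int) : Decidable (Spec_extract_resource_ids_py path_params out) := by unfold Spec_extract_resource_ids_py; infer_instance

-- ===== CLAIM (what is proved, stated in full; the proofs are below) =====
def Claim_equal_extract_resource_ids_py : Prop := ∀ (path_params : List (String × String)), Dom_extract_resource_ids_py path_params → Spec_extract_resource_ids_py path_params (extract_resource_ids_py path_params)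

-- ===== LEMMAS AND PROOFS =====

/-- The parse-one-item function both ports are built from. -/
def extractPick (kv : String × String) : Option Int :=
  if kv.1 == "id" || PySem.Str.endswith kv.1 "_id" then PySem.Int.ofStr? kv.2 else none

theorem foldl_eq_filterMap (l : List (String × String)) (acc : List Int) :
    l.foldl (fun acc kv =>
      if kv.1 == "id" || PySem.Str.endswith kv.1 "_id" then
        match PySem.Int.ofStr? kv.2 with
        | some n => acc ++ [n]
        | none => acc
      else acc) acc = acc ++ l.filterMap extractPick := by
  induction l generalizing acc with
  | nil => simp
  | cons kv rest ih =>
    have hstep : ∀ acc : List Int, (if kv.1 == "id" || PySem.Str.endswith kv.1 "_id" then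
        match PySem.Int.ofStr? kv.2 with
        | some n => acc ++ [n]
        | none => acc
      else acc) = acc ++ (extractPick kv).toList := by
      intro acc
      unfold extractPick
      split_ifs with h
      · cases PySem.Int.ofStr? kv.2 <;> simp
      · simp
    simp only [List.foldl_cons]
    rw [hstep, ih, List.append_assoc, List.filterMap_cons]
    cases extractPick kv <;> simp

theorem altGo_step (kv : String × String) (rest : List (String × String)) :
    extractAltGo (kv :: rest) =
      match extractPick kv with
      | some n => some n
      | none => extractAltGo rest := by
  obtain ⟨k, v⟩ := kv
  show (if k == "id" || PySem.Str.endswith k "_id" then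
      match PySem.Int.ofStr? v with
      | some n => some n
      | none => extractAltGo rest
    else extractAltGo rest) =
    match extractPick (k, v) with
    | some n => some n
    | none => extractAltGo rest
  unfold extractPick
  split_ifs with h
  · rfl
  · rfl

theorem altGo_eq_head (l : List (String × String)) :
    extractAltGo l = (l.filterMap extractPick).head? := by
  induction l with
  | nil => simp [extractAltGo]
  | cons kv rest ih =>
    rw [altGo_step, List.filterMap_cons]
    cases extractPick kv
    · exact ih
    · rfl

-- ===== VERDICT (by name: the statement is the Claim_ definition above) =====
theorem extract_resource_ids_py_spec : Claim_equal_extract_resource_ids_py := by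
  intro l _
  show extract_resource_ids_py l = extract_resource_ids_py_alt l
  unfold extract_resource_ids_py extract_resource_ids_py_alt
  rw [altGo_eq_head, List.filterMap_reverse, List.head?_reverse]
  simp only [foldl_eq_filterMap, List.nil_append]
  split_ifs with h1 h2
  · simp [h1]
  · simp [h2]
  · exact PySem.List.pyGet?_neg_one _
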